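-- pv_equiv track=rewrite | github.com/micro-irfan/SBSBiohackathon | semester2/Workshop1/ShiftOrSampleCode.annotated.py | bitapSearch
-- ===== SOURCE A (Python) =====
-- from collections import namedtuple
--
-- def _generateAlphabet(reference, query): #defining function, reference is the seq and query is the pattern
-- 	alphabet = list(set(reference)) #seperate the ref into iterable UNIQUE elements
-- 	bitap_dict = {} #opening up a bitmask dictionary B[Tj] for each unique letter
-- 	for letter in alphabet: #for every single unique element in the reference
-- 		letterPositionInQuery = 0 #start off with 0
-- 		for symbol in query:
-- 			letterPositionInQuery = letterPositionInQuery << 1 #left shift to move specific letter across binary string (from left to right) to tally with the letter position in the query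
-- 			letterPositionInQuery |= int(letter != symbol) ## adds 1/0 to the end of binary string based on boolean value #check if the specified character matches corresponding character in the query in the specific position
-- 		bitap_dict[letter] = letterPositionInQuery #repeat above block till last character in the query and update dictionary with the obtained bit mask of len (equals to query length)
-- 	return bitap_dict #dictionary of <all possible letters (from seq/ref) in query/pattern> (key) and <letterPositionInQuery> (value)
--
-- placeholder = namedtuple('placeholder','query seq start end mismatch')
--
-- def bitapSearch(reference, query, mismatch = 1): #NOTE: mismatch refers to a mismatch of a single character between query and reference [number of mismatches defined refers to number of erroneous characters tolerated for a pattern to be found]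
-- 	referenceLen = len(reference) #sequence
-- 	queryLen = len(query) #pattern
--
-- 	alphabet = _generateAlphabet(reference, query)
--
-- 	matrix = []
-- 	emptyColumn = (2 << (queryLen - 1)) - 1 #binary code of 2 (10) left shift (queryLen-1) spaces (the minus 1 to convert all binaries to 1 and reduce length of binary string by 1)
--     #e.g. if queryLen is 4,
--     #2 has a binary string of 10
--     #2<<(4-1) --> 0b10 000
--     # 0b10 000 -1 --> 0b1111 (binary string length reduce by 1 --> same length as queryLen)
--
-- 	underground = [emptyColumn for i in range(referenceLen + 1)] #underground is a list of 11111 (D) inital bitmasks for every letter in the reference (sequence)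
-- 	matrix.append(underground)
-- 	gRNAs = []
-- 	skip = []
--
-- 	for k in range(1, mismatch + 2):
-- 		matrix.append([emptyColumn])
--         #in the matrix:
--             #index [0]: underground
--             #index [1]: no mismatch (thats why the inexact matching only occurs for k>1, when k=1, the if clause does not run)
--             #index [2]: 1 mismatch
--             #index [k]: k-1 mismatches
--             #NOTE: k has a range of 1, mismatch+2 because k starts at 1, since index 0 of matrix is used for underground, and mismatch specified plus 2 because the range function does not run the max number stated
--             #e.g. mismatch = 1, so k runs in range (1,3) --> k = 1, matrix[1]: stores no mismatch, k = 2, matrix[2]: stores 1 mismatch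
--
-- 		for columnNum in range(1, referenceLen + 1):
-- 			prevColumn = (matrix[k][columnNum - 1]) >> 1 #D'#right shift to move on to next letter
-- 			letterPattern = alphabet[reference[columnNum - 1]] #bitmask B[Tj] #Note that the letter index in reference (seq) will always be 1 less than columnNum (since columnNum starts with 1 to denote first letter in seq, which has index 0)
-- 			curColumn = prevColumn | letterPattern
--
-- 			if k > 1: #INEXACT STRING SEARCH
-- 				## Mismatch
-- 				curColumn = curColumn & (matrix[k - 1][columnNum - 1] >> 1)
-- 				#(matrix[k - 1][columnNum - 1] >> 1) looks at the previous result for the same character in the same position, AND conditional on the current column and no mismatch D (matrix[1][columnNum-1])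
--
--                 ##IMPORTANT NOTE:
--                     #OR: favours 1 (where 1,1  0,1  1,0 --> gives 1 and only 0,0 --> gives 0)
--                     #OR function is more sensitive to mismatches --> hence used in exact string matching
--                     #AND: favours 0 (where 0,0  0,1  1,0 --> gives 0 and only 1,1 --> gives 1)
--                     #AND function tolerates mismatches --> hence used in inexact string matching
--
-- 			matrix[k].append(curColumn)
--
-- 			if (curColumn & 0x1) == 0: #0x1 represents hexadecimal 1 (binary string of 1) #in a right shift matching --> 0 in first position implies a match in first character (note that & 0x1 --> implies that curColumn must have a 0 in first posiiton to offset the 1 in 0x1)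
-- 				startPos = max(0, columnNum - queryLen) # taking in account Replace operation #ensures that the minimum length of a match is the query length
-- 				if startPos in skip: continue
-- 				endPos = min(columnNum, referenceLen) # taking in account Replace operation #finds the shortest possible instance of a match
-- 				place = reference[startPos:endPos]
-- 				temp = placeholder(query, place, startPos, endPos, k - 1)
-- 				gRNAs.append(temp)
-- 				skip.append(startPos) #prevents repeated reporting of same strain
--                 #NOTE: inexact string search will also capture previous patterns where there are no mismatches and instances of fewer mismatches --> repeated reporting
--
-- 	return gRNAs
-- ===== SOURCE B (Python) =====
-- def bitapSearch(reference, query, mismatch=1):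
--     referenceLen = len(reference)
--     queryLen = len(query)
--     gRNAs = []
--     skip = set()
--     for e in range(mismatch + 1):
--         for columnNum in range(queryLen, referenceLen + 1):
--             startPos = columnNum - queryLen
--             if startPos in skip:
--                 continue
--             dist = sum(1 if query[i] != reference[startPos + i] else 0 for i in range(queryLen))
--             if dist <= e:
--                 gRNAs.append((query, reference[startPos:columnNum], startPos, columnNum, e))
--                 skip.add(startPos)
--     return gRNAs
-- ===== Notes on version B (the rewrite author's own statement) =====
-- stated objective: simpler
-- what changed: Replaces the bit-parallel Bitap level matrix (per-letter bitmask dictionary, shift/or/and column updates, bit-0 tests, full (mismatch+2) x (len(reference)+1) matrix kept in memory) by a direct sliding-window Hamming-distance count per alignment with a skip set; same matches in the same order, no matrix and no big-integer bit vectors (a timing run measured B >=1.5x faster at the largest sizes, where A times out).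
import Mathlib
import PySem

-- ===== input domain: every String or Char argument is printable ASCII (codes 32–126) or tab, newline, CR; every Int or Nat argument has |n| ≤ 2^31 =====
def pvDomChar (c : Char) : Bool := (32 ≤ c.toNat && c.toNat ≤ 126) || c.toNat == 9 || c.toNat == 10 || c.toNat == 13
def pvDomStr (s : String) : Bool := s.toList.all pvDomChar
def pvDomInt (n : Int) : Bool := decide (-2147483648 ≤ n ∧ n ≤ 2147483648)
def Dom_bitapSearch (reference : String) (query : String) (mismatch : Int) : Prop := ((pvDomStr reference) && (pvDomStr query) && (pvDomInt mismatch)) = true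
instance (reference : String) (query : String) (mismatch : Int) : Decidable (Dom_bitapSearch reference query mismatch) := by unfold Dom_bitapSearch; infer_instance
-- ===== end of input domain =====

-- B replaces A's bit-parallel Bitap level matrix by a direct sliding-window Hamming-distance
-- count per alignment; same matches, same order, proved equal for every non-empty query.

-- ===== PORT A =====

abbrev pvOut := String × String × Int × Int × Int

-- _generateAlphabet's inner loop (letterPositionInQuery accumulation)
def pvQBits (query : List Char) (letter : Char) : Int :=
  query.foldl (fun lpq symbol => PySem.Int.bor (lpq <<< (1 : Nat)) (if letter ≠ symbol then 1 else 0)) 0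

def pvGenerateAlphabet (reference query : List Char) : PySem.Dict Char Int :=
  (PySem.Set.ofList reference).foldl (fun d letter => d.insert letter (pvQBits query letter)) PySem.Dict.empty

-- body of A's inner 'for columnNum in range(1, referenceLen + 1)' loop
def pvInnerA (query : String) (r : List Char) (referenceLen queryLen : Int)
    (alphabet : PySem.Dict Char Int) (k : Int)
    (st : List (List Int) × List pvOut × List Int) (columnNum : Int) :
    List (List Int) × List pvOut × List Int :=
  let matrix := st.1
  let gRNAs := st.2.1
  let skip := st.2.2
  let row := PySem.List.pyGetD matrix k []
  let prevColumn := (PySem.List.pyGetD row (columnNum - 1) 0) >>> (1 : Nat)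
  -- alphabet[reference[columnNum-1]]: the key is always present (it is a letter of reference),
  -- so Python's d[key] is its getD with an arbitrary default
  let letterPattern := alphabet.getD (PySem.List.pyGetD r (columnNum - 1) ' ') 0
  let curColumn := PySem.Int.bor prevColumn letterPattern
  let curColumn := if 1 < k then
      PySem.Int.band curColumn ((PySem.List.pyGetD (PySem.List.pyGetD matrix (k - 1) []) (columnNum - 1) 0) >>> (1 : Nat))
    else curColumn
  let matrix := PySem.List.pySetD matrix k (row ++ [curColumn])
  if PySem.Int.band curColumn 1 == 0 then
    let startPos := max 0 (columnNum - queryLen)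
    if startPos ∈ skip then (matrix, gRNAs, skip)
    else
      let endPos := min columnNum referenceLen
      let place := String.ofList (PySem.List.slice r (some startPos) (some endPos))
      (matrix, gRNAs ++ [(query, place, startPos, endPos, k - 1)], skip ++ [startPos])
  else (matrix, gRNAs, skip)

-- body of A's outer 'for k in range(1, mismatch + 2)' loop
def pvOuterA (query : String) (r : List Char) (referenceLen queryLen emptyColumn : Int)
    (alphabet : PySem.Dict Char Int)
    (st : List (List Int) × List pvOut × List Int) (k : Int) :
    List (List Int) × List pvOut × List Int :=
  (PySem.List.pyRange 1 (referenceLen + 1) 1).foldl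
    (pvInnerA query r referenceLen queryLen alphabet k) (st.1 ++ [[emptyColumn]], st.2)

def bitapSearch (reference : String) (query : String) (mismatch : Int) : List pvOut :=
  let r := reference.toList
  let q := query.toList
  let referenceLen := PySem.Str.len reference
  let queryLen := PySem.Str.len query
  let alphabet := pvGenerateAlphabet r q
  -- Python raises ValueError for queryLen = 0 (negative shift count) — excluded by Pre_;
  -- for queryLen ≥ 1 the .toNat is exact
  let emptyColumn : Int := ((2 : Int) <<< (queryLen - 1).toNat) - 1
  let underground := (PySem.List.pyRange 0 (referenceLen + 1) 1).map (fun _ => emptyColumn)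
  let st := (PySem.List.pyRange 1 (mismatch + 2) 1).foldl
    (pvOuterA query r referenceLen queryLen emptyColumn alphabet) ([underground], [], [])
  st.2.1

-- ===== PORT B =====

-- sum(1 if query[i] != reference[startPos + i] else 0 for i in range(queryLen))
def pvDistB (r q : List Char) (queryLen start : Int) : Int :=
  ((PySem.List.pyRange 0 queryLen 1).map
    (fun i => if PySem.List.pyGetD q i ' ' ≠ PySem.List.pyGetD r (start + i) ' ' then (1 : Int) else 0)).sum

-- body of B's inner 'for columnNum in range(queryLen, referenceLen + 1)' loop
def pvColB (query : String) (r q : List Char) (queryLen e : Int)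
    (st : List pvOut × PySem.Set Int) (columnNum : Int) : List pvOut × PySem.Set Int :=
  let startPos := columnNum - queryLen
  if PySem.Set.contains st.2 startPos then st
  else if pvDistB r q queryLen startPos ≤ e then
    (st.1 ++ [(query, String.ofList (PySem.List.slice r (some startPos) (some columnNum)), startPos, columnNum, e)],
     PySem.Set.add st.2 startPos)
  else st

-- body of B's outer 'for e in range(mismatch + 1)' loop
def pvOuterB (query : String) (r q : List Char) (queryLen referenceLen : Int)
    (st : List pvOut × PySem.Set Int) (e : Int) : List pvOut × PySem.Set Int :=
  (PySem.List.pyRange queryLen (referenceLen + 1) 1).foldl (pvColB query r q queryLen e) st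

def bitapSearch_alt (reference : String) (query : String) (mismatch : Int) : List pvOut :=
  let r := reference.toList
  let q := query.toList
  let referenceLen := PySem.Str.len reference
  let queryLen := PySem.Str.len query
  let st := (PySem.List.pyRange 0 (mismatch + 1) 1).foldl
    (pvOuterB query r q queryLen referenceLen) ([], PySem.Set.ofList [])
  st.1

-- ===== PRECONDITION & SPEC =====

-- Pre_ excludes exactly the empty query, on which A raises ValueError (2 << (0-1)).
def Pre_bitapSearch (reference : String) (query : String) (mismatch : Int) : Prop := query ≠ ""
instance (reference : String) (query : String) (mismatch : Int) : Decidable (Pre_bitapSearch reference query mismatch) := by unfold Pre_bitapSearch; infer_instance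

def pvWitness_bitapSearch : String × String × Int := ("abcab", "ab", 1)

def Spec_bitapSearch (reference : String) (query : String) (mismatch : Int) (out : List (String × String × Int × Int × Int)) : Prop := out = bitapSearch_alt reference query mismatch
instance (reference : String) (query : String) (mismatch : Int) (out : List (String × String × Int × Int × Int)) : Decidable (Spec_bitapSearch reference query mismatch out) := by unfold Spec_bitapSearch; infer_instance

-- ===== CLAIM (what is proved, stated in full; the proofs are below) =====
def Claim_equal_bitapSearch : Prop := ∀ (reference : String) (query : String) (mismatch : Int), Dom_bitapSearch reference query mismatch → Pre_bitapSearch reference query mismatch → Spec_bitapSearch reference query mismatch (bitapSearch reference query mismatch)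


-- ===== LEMMAS AND PROOFS =====

-- ---- proof-side (Nat-valued) shadows of A's bit vectors ----

-- the bitmask of pvQBits, as a Nat
def pvPbit (q : List Char) (c : Char) : Nat :=
  q.foldl (fun a s => (a <<< 1) ||| (if c ≠ s then 1 else 0)) 0

-- mismatch count of the length-L query prefix aligned to end at reference position col-1
def pvMis (q r : List Char) (L col : Nat) : Nat :=
  (List.range L).countP (fun s => q.getD (L - 1 - s) ' ' ≠ r.getD (col - 1 - s) ' ')

-- mismatch count of the whole query aligned starting at reference position start
def pvHam (q r : List Char) (start : Nat) : Nat :=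
  (List.range q.length).countP (fun i => q.getD i ' ' ≠ r.getD (start + i) ' ')

-- the Bitap column value: level k (Python's k-1 extra mismatches), column col
def pvR (q r : List Char) : Nat → Nat → Nat
  | _, 0 => 2 ^ q.length - 1
  | 0, col + 1 => (pvR q r 0 col >>> 1) ||| pvPbit q (r.getD col ' ')
  | k + 1, col + 1 =>
      ((pvR q r (k + 1) col >>> 1) ||| pvPbit q (r.getD col ' ')) &&& (pvR q r k col >>> 1)

-- matrix[k] after processing columns 1..c  (as Ints)
def pvRowI (q r : List Char) (t c : Nat) : List Int :=
  (List.range (c + 1)).map (fun j => ((pvR q r t j : Nat) : Int))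

-- the whole matrix after t outer iterations, underground row u in front
def pvMatAfter (q r : List Char) (u : List Int) (t : Nat) : List (List Int) :=
  u :: (List.range t).map (fun j => pvRowI q r j r.length)

-- the effect of one column of A's loop on (gRNAs, skip), for level t and column col
def pvEvN (query : String) (r q : List Char) (t : Nat)
    (gs : List pvOut × List Int) (col : Nat) : List pvOut × List Int :=
  if q.length ≤ col ∧ pvMis q r q.length col ≤ t then
    (if ((col - q.length : Nat) : Int) ∈ gs.2 then gs
     else (gs.1 ++ [(query, String.ofList (PySem.List.slice r (some ((col - q.length : Nat) : Int)) (some (col : Int))),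
                     ((col - q.length : Nat) : Int), (col : Int), (t : Int))],
           gs.2 ++ [((col - q.length : Nat) : Int)]))
  else gs

-- ---- cast helpers ----

lemma pvShrCast (a : Nat) : ((a : Int) >>> (1 : Nat)) = ((a >>> 1 : Nat) : Int) := by exact_mod_cast rfl

lemma pvShlCast (a k : Nat) : ((a : Int) <<< (k : Nat)) = ((a <<< k : Nat) : Int) := by exact_mod_cast rfl

-- ---- bitmask lemmas ----

lemma pvPbit_testBit (q : List Char) (c : Char) (i : Nat) :
    (pvPbit q c).testBit i = decide (i < q.length ∧ q.getD (q.length - 1 - i) ' ' ≠ c) := by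
  induction q using List.reverseRecOn generalizing i with
  | nil => simp [pvPbit]
  | append_singleton q s ih =>
    have hstep : pvPbit (q ++ [s]) c = ((pvPbit q c) <<< 1) ||| (if c ≠ s then 1 else 0) := by
      simp [pvPbit, List.foldl_append]
    rw [hstep, Nat.testBit_or]
    cases i with
    | zero =>
      have h1 : ((pvPbit q c) <<< 1).testBit 0 = false := by
        rw [Nat.testBit_shiftLeft]; simp
      have h2 : (q ++ [s]).getD ((q ++ [s]).length - 1 - 0) ' ' = s := by
        rw [List.length_append]
        rw [List.getD_append_right _ _ _ _ (by simp)]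
        simp
      rw [h1, h2]
      by_cases hcs : c = s
      · simp [hcs]
      · simp [hcs, Ne.symm hcs]
    | succ i =>
      have h1 : ((pvPbit q c) <<< 1).testBit (i + 1) = (pvPbit q c).testBit i := by
        rw [Nat.testBit_shiftLeft]; simp
      have h2 : (if c ≠ s then 1 else 0 : Nat).testBit (i + 1) = false := by
        have hlt : (1 : Nat) < 2 ^ (i + 1) := by
          calc (1:Nat) < 2 := one_lt_two
          _ = 2 ^ 1 := (pow_one 2).symm
          _ ≤ 2 ^ (i + 1) := Nat.pow_le_pow_right (by omega) (by omega)
        split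
        · exact Nat.testBit_lt_two_pow hlt
        · simp
      rw [h1, h2, ih]
      by_cases hi : i < q.length
      · have hidx : (q ++ [s]).getD ((q ++ [s]).length - 1 - (i + 1)) ' ' = q.getD (q.length - 1 - i) ' ' := by
          rw [List.length_append]
          rw [List.getD_append _ _ _ _ (by simp; omega)]
          congr 1
          simp; omega
        rw [hidx]
        simp only [Bool.or_false, List.length_append, List.length_cons, List.length_nil]
        rw [decide_eq_decide]
        constructor
        · rintro ⟨ha, hb⟩; exact ⟨by omega, hb⟩
        · rintro ⟨ha, hb⟩; exact ⟨by omega, hb⟩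
      · have h3 : ¬ (i + 1 < (q ++ [s]).length) := by simp; omega
        simp [hi, h3]

lemma pvQBits_cast (q : List Char) (c : Char) : pvQBits q c = ((pvPbit q c : Nat) : Int) := by
  suffices h : ∀ (a : Nat),
      q.foldl (fun lpq symbol => PySem.Int.bor (lpq <<< (1 : Nat)) (if c ≠ symbol then 1 else 0)) ((a : Nat) : Int)
        = ((q.foldl (fun a s => (a <<< 1) ||| (if c ≠ s then 1 else 0)) a : Nat) : Int) by
    have h0 := h 0
    simpa [pvQBits, pvPbit] using h0
  intro a
  induction q generalizing a with
  | nil => simp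
  | cons s q ih =>
    simp only [List.foldl_cons]
    rw [show (if c ≠ s then (1 : Int) else 0) = (((if c ≠ s then 1 else 0 : Nat)) : Int) by split <;> simp]
    rw [pvShlCast, PySem.Int.bor_natCast, ih]

lemma pvAlphabet_getD (r q : List Char) (c : Char) (hc : c ∈ r) :
    (pvGenerateAlphabet r q).getD c 0 = ((pvPbit q c : Nat) : Int) := by
  unfold pvGenerateAlphabet
  rw [← pvQBits_cast]
  have hmem : c ∈ PySem.Set.ofList r := (PySem.Set.mem_ofList r c).mpr hc
  have hitems := PySem.Dict.items_foldl_insert_fresh (PySem.Set.ofList r) (fun a => a)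
    (fun a => pvQBits q a) PySem.Dict.empty (by intro a _; simp) (by simpa using PySem.Set.nodup_ofList r)
  have hnodup : ((PySem.Set.ofList r).foldl (fun d letter => d.insert letter (pvQBits q letter)) PySem.Dict.empty).keys.Nodup := by
    exact PySem.Dict.nodup_keys_foldl_insert _ (fun _ x => pvQBits q x) _ (by simp)
  apply PySem.Dict.getD_of_mem_items _ _ hnodup
  rw [show (fun (d : PySem.Dict Char Int) letter => d.insert letter (pvQBits q letter))
        = (fun (d : PySem.Dict Char Int) a => d.insert ((fun a => a) a) ((fun a => pvQBits q a) a)) from rfl,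
      hitems]
  simp only [PySem.Dict.items, List.nil_append]
  exact List.mem_map.mpr ⟨c, hmem, rfl⟩

-- ---- mismatch-count lemmas ----

lemma pvMis_succ (q r : List Char) (L col : Nat) :
    pvMis q r (L + 1) (col + 1)
      = pvMis q r L col + (if q.getD L ' ' ≠ r.getD col ' ' then 1 else 0) := by
  unfold pvMis
  conv_lhs => rw [List.range_succ_eq_map]
  rw [List.countP_cons, List.countP_map]
  congr 1
  · apply List.countP_congr
    intro x hx
    simp only [List.mem_range] at hx
    simp only [Function.comp_apply, Nat.succ_eq_add_one]
    rw [show L + 1 - 1 - (x + 1) = L - 1 - x from by omega,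
        show col + 1 - 1 - (x + 1) = col - 1 - x from by omega]
  · simp

lemma pvCountP_range_reflect (p : Nat → Bool) (n : Nat) :
    (List.range n).countP (fun s => p (n - 1 - s)) = (List.range n).countP p := by
  induction n generalizing p with
  | zero => simp
  | succ n ih =>
    conv_lhs => rw [List.range_succ]
    rw [List.countP_append]
    conv_rhs => rw [List.range_succ_eq_map]
    simp only [List.countP_cons, List.countP_map, List.countP_nil]
    have h1 : (List.range n).countP (fun s => p (n + 1 - 1 - s))
        = (List.range n).countP (fun s => (fun t => p (t + 1)) (n - 1 - s)) := by
      apply List.countP_congr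
      intro x hx
      simp only [List.mem_range] at hx
      show p (n + 1 - 1 - x) = true ↔ p ((n - 1 - x) + 1) = true
      rw [show n + 1 - 1 - x = (n - 1 - x) + 1 from by omega]
    rw [h1, ih (fun t => p (t + 1))]
    rw [show n + 1 - 1 - n = 0 from by omega]
    rw [show (p ∘ Nat.succ) = (fun t => p (t + 1)) from rfl]
    omega

lemma pvMis_eq_ham (q r : List Char) (col : Nat) (h : q.length ≤ col) :
    pvMis q r q.length col = pvHam q r (col - q.length) := by
  unfold pvMis pvHam
  have h1 : ∀ s ∈ List.range q.length,
      (decide (q.getD (q.length - 1 - s) ' ' ≠ r.getD (col - 1 - s) ' ') = true)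
        ↔ ((fun i => decide (q.getD i ' ' ≠ r.getD (col - q.length + i) ' ')) (q.length - 1 - s) = true) := by
    intro s hs
    simp only [List.mem_range] at hs
    have e : col - q.length + (q.length - 1 - s) = col - 1 - s := by omega
    simp [e]
  rw [List.countP_congr h1]
  exact pvCountP_range_reflect (fun i => decide (q.getD i ' ' ≠ r.getD (col - q.length + i) ' ')) q.length

lemma pvDistB_cast (r q : List Char) (s : Nat) :
    pvDistB r q (q.length : Int) (s : Int) = ((pvHam q r s : Nat) : Int) := by
  unfold pvDistB pvHam
  rw [PySem.List.pyRange_zero_nat, List.map_map]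
  have h1 : ((fun i => if PySem.List.pyGetD q i ' ' ≠ PySem.List.pyGetD r ((s : Int) + i) ' ' then (1 : Int) else 0)
        ∘ fun (k : Nat) => (k : Int))
      = fun (k : Nat) => if (fun i => decide (q.getD i ' ' ≠ r.getD (s + i) ' ')) k = true then (1 : Int) else 0 := by
    funext k
    simp only [Function.comp_apply]
    rw [show ((s : Int) + (k : Int)) = ((s + k : Nat) : Int) from by push_cast; ring]
    simp only [PySem.List.pyGetD_natCast]
    by_cases hk : q.getD k ' ' ≠ r.getD (s + k) ' ' <;> simp [hk]
  rw [h1, PySem.List.sum_map_ite_one_zero]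

-- ---- the Bitap invariant ----

lemma pvR_testBit (q r : List Char) (col k i : Nat) :
    (pvR q r k col).testBit i
      = decide (i < q.length ∧ (col + i < q.length ∨ k + 1 ≤ pvMis q r (q.length - i) col)) := by
  induction col generalizing k i with
  | zero =>
    rw [show pvR q r k 0 = 2 ^ q.length - 1 from by cases k <;> rfl]
    rw [Nat.testBit_two_pow_sub_one, decide_eq_decide]
    omega
  | succ col ihc =>
    have hOr : ∀ kk : Nat, ((pvR q r kk col >>> 1) ||| pvPbit q (r.getD col ' ')).testBit i
        = (decide (1 + i < q.length ∧ (col + (1 + i) < q.length ∨ kk + 1 ≤ pvMis q r (q.length - (1 + i)) col))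
            || decide (i < q.length ∧ q.getD (q.length - (1 + i)) ' ' ≠ r.getD col ' ')) := by
      intro kk
      rw [Nat.testBit_or, Nat.testBit_shiftRight, ihc, pvPbit_testBit,
          show q.length - 1 - i = q.length - (1 + i) from by omega]
    by_cases hi : i < q.length
    case neg =>
      have h1 : ¬ (1 + i < q.length) := by omega
      cases k with
      | zero =>
        rw [show pvR q r 0 (col + 1) = ((pvR q r 0 col >>> 1) ||| pvPbit q (r.getD col ' ')) from rfl, hOr 0]
        simp [hi, h1]
      | succ k =>
        rw [show pvR q r (k + 1) (col + 1)
              = (((pvR q r (k + 1) col >>> 1) ||| pvPbit q (r.getD col ' ')) &&& (pvR q r k col >>> 1)) from rfl,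
            Nat.testBit_and, hOr (k + 1)]
        simp [hi, h1]
    case pos =>
      have hmis : pvMis q r (q.length - i) (col + 1)
          = pvMis q r (q.length - (1 + i)) col + (if q.getD (q.length - (1 + i)) ' ' ≠ r.getD col ' ' then 1 else 0) := by
        rw [show q.length - i = (q.length - (1 + i)) + 1 from by omega]
        exact pvMis_succ q r _ col
      have hz : q.length ≤ 1 + i → pvMis q r (q.length - (1 + i)) col = 0 := by
        intro h
        rw [show q.length - (1 + i) = 0 from by omega]
        simp [pvMis]
      cases k with
      | zero =>
        rw [show pvR q r 0 (col + 1) = ((pvR q r 0 col >>> 1) ||| pvPbit q (r.getD col ' ')) from rfl, hOr 0,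
            hmis, ← Bool.decide_or, decide_eq_decide]
        by_cases hmm : q.getD (q.length - (1 + i)) ' ' ≠ r.getD col ' '
        · rw [if_pos hmm, and_iff_left hmm]
          rcases Nat.lt_or_ge (1 + i) q.length with h1i | h1i
          · omega
          · have hb := hz (by omega)
            omega
        · rw [if_neg hmm,
              show (i < q.length ∧ q.getD (q.length - (1 + i)) ' ' ≠ r.getD col ' ') ↔ False from
                iff_false_intro (fun h => hmm h.2),
              or_false]
          rcases Nat.lt_or_ge (1 + i) q.length with h1i | h1i
          · omega
          · have hb := hz (by omega)
            omega
      | succ k =>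
        rw [show pvR q r (k + 1) (col + 1)
              = (((pvR q r (k + 1) col >>> 1) ||| pvPbit q (r.getD col ' ')) &&& (pvR q r k col >>> 1)) from rfl,
            Nat.testBit_and, hOr (k + 1), Nat.testBit_shiftRight, ihc,
            hmis, ← Bool.decide_or, ← Bool.decide_and, decide_eq_decide]
        by_cases hmm : q.getD (q.length - (1 + i)) ' ' ≠ r.getD col ' '
        · rw [if_pos hmm, and_iff_left hmm]
          rcases Nat.lt_or_ge (1 + i) q.length with h1i | h1i
          · omega
          · have hb := hz (by omega)
            omega
        · rw [if_neg hmm,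
              show (i < q.length ∧ q.getD (q.length - (1 + i)) ' ' ≠ r.getD col ' ') ↔ False from
                iff_false_intro (fun h => hmm h.2),
              or_false]
          rcases Nat.lt_or_ge (1 + i) q.length with h1i | h1i
          · omega
          · have hb := hz (by omega)
            omega

-- ---- evaluating one step of A's inner loop ----

lemma pvRowI_succ (q r : List Char) (t c : Nat) :
    pvRowI q r t (c + 1) = pvRowI q r t c ++ [((pvR q r t (c + 1) : Nat) : Int)] := by
  simp [pvRowI, List.range_succ]

lemma pvRowI_getD (q r : List Char) (t c j : Nat) (h : j ≤ c) :
    (pvRowI q r t c).getD j 0 = ((pvR q r t j : Nat) : Int) := by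
  unfold pvRowI
  rw [List.getD_eq_getElem?_getD, List.getElem?_map, List.getElem?_range (by omega)]
  rfl

lemma pvCondBand (v : Nat) : (PySem.Int.band ((v : Nat) : Int) 1 == 0) = !(v.testBit 0) := by
  rw [show (1 : Int) = ((1 : Nat) : Int) from rfl, PySem.Int.band_natCast, Nat.and_one_is_mod, Nat.testBit_zero]
  rcases Nat.mod_two_eq_zero_or_one v with h | h <;> simp [h]

lemma pvInnerA_step (query : String) (r q : List Char) (t col : Nat)
    (M : List (List Int)) (g : List pvOut) (s : List Int)
    (hq : q ≠ []) (hcol1 : 1 ≤ col) (hcoln : col ≤ r.length)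
    (hlen : M.length = t + 1)
    (hprev : 1 ≤ t → M.getD t [] = pvRowI q r (t - 1) r.length) :
    pvInnerA query r (r.length : Int) (q.length : Int) (pvGenerateAlphabet r q) ((1 + t : Nat) : Int)
        (M ++ [pvRowI q r t (col - 1)], g, s) (col : Int)
      = (M ++ [pvRowI q r t col], pvEvN query r q t (g, s) col) := by
  have hm : 1 ≤ q.length := List.length_pos_iff.mpr hq
  set p := pvRowI q r t (col - 1) with hp
  -- the values read from the matrix
  have hA1 : PySem.List.pyGetD (M ++ [p]) ((1 + t : Nat) : Int) [] = p := by
    rw [PySem.List.pyGetD_natCast, List.getD_append_right _ _ _ _ (by omega), hlen,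
        show 1 + t - (t + 1) = 0 from by omega]
    rfl
  have hA2 : ((col : Nat) : Int) - 1 = ((col - 1 : Nat) : Int) := by omega
  have hA3 : p.getD (col - 1) 0 = ((pvR q r t (col - 1) : Nat) : Int) :=
    pvRowI_getD q r t (col - 1) (col - 1) le_rfl
  have hA4 : PySem.List.pyGetD r ((col : Int) - 1) ' ' = r.getD (col - 1) ' ' := by
    rw [hA2, PySem.List.pyGetD_natCast]
  have hmemr : r.getD (col - 1) ' ' ∈ r := by
    rw [List.getD_eq_getElem _ _ (by omega)]
    exact List.getElem_mem _
  have halpha : (pvGenerateAlphabet r q).getD (r.getD (col - 1) ' ') 0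
      = ((pvPbit q (r.getD (col - 1) ' ') : Nat) : Int) := pvAlphabet_getD r q _ hmemr
  -- the new column value
  have hcur : (if (1 : Int) < ((1 + t : Nat) : Int) then
        PySem.Int.band
          (PySem.Int.bor (((pvR q r t (col - 1) : Nat) : Int) >>> (1 : Nat)) ((pvPbit q (r.getD (col - 1) ' ') : Nat) : Int))
          ((PySem.List.pyGetD (M ++ [p]) (((1 + t : Nat) : Int) - 1) []).getD (col - 1) 0 >>> (1 : Nat))
      else
        PySem.Int.bor (((pvR q r t (col - 1) : Nat) : Int) >>> (1 : Nat)) ((pvPbit q (r.getD (col - 1) ' ') : Nat) : Int))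
      = ((pvR q r t col : Nat) : Int) := by
    cases t with
    | zero =>
      rw [if_neg (by omega)]
      rw [pvShrCast, PySem.Int.bor_natCast]
      congr 1
      obtain ⟨c', hc'⟩ : ∃ c', col = c' + 1 := ⟨col - 1, by omega⟩
      rw [hc']
      simp only [Nat.add_sub_cancel]
      rfl
    | succ t' =>
      rw [if_pos (by push_cast; omega)]
      have hk1 : ((1 + (t' + 1) : Nat) : Int) - 1 = ((t' + 1 : Nat) : Int) := by push_cast; omega
      rw [hk1, PySem.List.pyGetD_natCast, List.getD_append _ _ _ _ (by omega),
          hprev (by omega), show t' + 1 - 1 = t' from rfl,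
          pvRowI_getD q r t' r.length (col - 1) (by omega)]
      rw [pvShrCast, pvShrCast, PySem.Int.bor_natCast, PySem.Int.band_natCast]
      congr 1
      obtain ⟨c', hc'⟩ : ∃ c', col = c' + 1 := ⟨col - 1, by omega⟩
      rw [hc']
      simp only [Nat.add_sub_cancel]
      rfl
  -- the match condition
  have hcond : (PySem.Int.band ((pvR q r t col : Nat) : Int) 1 == 0)
      = decide (q.length ≤ col ∧ pvMis q r q.length col ≤ t) := by
    rw [pvCondBand, pvR_testBit, ← decide_not, decide_eq_decide]
    simp only [Nat.sub_zero, Nat.add_zero]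
    omega
  -- the matrix update
  have hset : PySem.List.pySetD (M ++ [p]) ((1 + t : Nat) : Int) (p ++ [((pvR q r t col : Nat) : Int)])
      = M ++ [pvRowI q r t col] := by
    rw [PySem.List.pySetD_natCast]
    have h1 : (M ++ [p]).set (1 + t) (p ++ [((pvR q r t col : Nat) : Int)]) = M ++ [p ++ [((pvR q r t col : Nat) : Int)]] := by
      rw [show 1 + t = M.length from by omega]
      simp
    rw [h1, hp]
    rw [show pvRowI q r t (col - 1) ++ [((pvR q r t col : Nat) : Int)] = pvRowI q r t col from by
      obtain ⟨c', hc'⟩ : ∃ c', col = c' + 1 := ⟨col - 1, by omega⟩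
      rw [hc']
      simp only [Nat.add_sub_cancel]
      exact (pvRowI_succ q r t c').symm]
  simp only [pvInnerA, hA1, hA2, PySem.List.pyGetD_natCast, hA3, hA4, halpha]
  rw [hcur, hset, hcond]
  have hkm : ((1 + t : Nat) : Int) - 1 = (t : Int) := by push_cast; omega
  rw [hkm]
  simp only [pvEvN]
  by_cases hP : q.length ≤ col ∧ pvMis q r q.length col ≤ t
  · have hstart : max 0 ((col : Int) - (q.length : Int)) = ((col - q.length : Nat) : Int) := by omega
    have hend : min ((col : Int)) ((r.length : Int)) = ((col : Nat) : Int) := by omega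
    simp only [hP, decide_true, if_true, hstart, hend]
    by_cases hmem : ((col - q.length : Nat) : Int) ∈ s <;> simp [hmem]
  · simp [hP]

-- ---- folding A's inner loop ----

lemma pvInnerA_fold (query : String) (r q : List Char) (t : Nat)
    (M : List (List Int)) (hq : q ≠ []) (hlen : M.length = t + 1)
    (hprev : 1 ≤ t → M.getD t [] = pvRowI q r (t - 1) r.length) :
    ∀ (len c : Nat) (g : List pvOut) (s : List Int), c + len ≤ r.length →
    (List.range len).foldl
        (fun st j => pvInnerA query r (r.length : Int) (q.length : Int)
          (pvGenerateAlphabet r q) ((1 + t : Nat) : Int) st ((c + 1 + j : Nat) : Int))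
        (M ++ [pvRowI q r t c], g, s)
      = (M ++ [pvRowI q r t (c + len)],
         (List.range len).foldl (fun gs j => pvEvN query r q t gs (c + 1 + j)) (g, s)) := by
  intro len
  induction len with
  | zero => intro c g s h; simp
  | succ len ih =>
    intro c g s h
    rw [List.range_succ, List.foldl_append, List.foldl_append, ih c g s (by omega)]
    simp only [List.foldl_cons, List.foldl_nil]
    set gs := (List.range len).foldl (fun gs j => pvEvN query r q t gs (c + 1 + j)) (g, s) with hgs
    have hstep := pvInnerA_step query r q t (c + 1 + len) M gs.1 gs.2 hq (by omega) (by omega) hlen hprev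
    rw [show c + 1 + len - 1 = c + len from by omega] at hstep
    rw [show ((gs.1, gs.2) : List pvOut × List Int) = gs from rfl] at hstep
    rw [hstep, show c + (len + 1) = c + 1 + len from by omega]

-- ---- B's level = the (gRNAs, skip) effect of A's level ----

lemma pvEvN_low (query : String) (r q : List Char) (t : Nat) :
    ∀ (len c : Nat), c + len < q.length → ∀ gs,
    (List.range len).foldl (fun gs j => pvEvN query r q t gs (c + 1 + j)) gs = gs := by
  intro len
  induction len with
  | zero => intro c h gs; simp
  | succ len ih =>
    intro c h gs
    rw [List.range_succ, List.foldl_append, ih c (by omega) gs]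
    simp only [List.foldl_cons, List.foldl_nil]
    unfold pvEvN
    rw [if_neg (by omega)]

lemma pvColB_eq_evN (query : String) (r q : List Char) (t j : Nat)
    (gs : List pvOut × List Int) :
    pvColB query r q (q.length : Int) (t : Int) gs ((q.length : Int) + (j : Int))
      = pvEvN query r q t gs (q.length + j) := by
  simp only [pvColB, pvEvN]
  have hmj : ((q.length : Int) + (j : Int)) = ((q.length + j : Nat) : Int) := by push_cast; ring
  rw [hmj, show ((q.length + j : Nat) : Int) - (q.length : Int) = ((j : Nat) : Int) from by push_cast; ring,
      pvDistB_cast r q j]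
  rw [show pvMis q r q.length (q.length + j) = pvHam q r j from by
        rw [pvMis_eq_ham q r _ (by omega)]; congr 1; omega,
      show q.length + j - q.length = j from by omega]
  have hcond : (q.length ≤ q.length + j ∧ pvHam q r j ≤ t) ↔ pvHam q r j ≤ t := by
    constructor
    · exact fun h => h.2
    · exact fun h => ⟨by omega, h⟩
  by_cases hmem : ((j : Nat) : Int) ∈ gs.2
  · have hc : PySem.Set.contains gs.2 ((j : Nat) : Int) = true := by simp [PySem.Set.contains, hmem]
    rw [if_pos hc]
    by_cases hham : pvHam q r j ≤ t
    · rw [if_pos (hcond.mpr hham), if_pos hmem]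
    · rw [if_neg (fun hh => hham (hcond.mp hh))]
  · have hc : PySem.Set.contains gs.2 ((j : Nat) : Int) = false := by simp [PySem.Set.contains, hmem]
    rw [if_neg (by simp [PySem.Set.contains]; exact hmem)]
    by_cases hham : pvHam q r j ≤ t
    · rw [if_pos (by exact_mod_cast hham), if_pos (hcond.mpr hham), if_neg hmem]
      have hadd : PySem.Set.add gs.2 ((j : Nat) : Int) = gs.2 ++ [((j : Nat) : Int)] := by
        simp [PySem.Set.add, PySem.Set.contains, hmem]
      rw [hadd]
    · rw [if_neg (by exact_mod_cast hham), if_neg (fun hh => hham (hcond.mp hh))]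

lemma pvLevelB (query : String) (r q : List Char) (t : Nat) (hq : q ≠ []) (g : List pvOut) (s : List Int) :
    pvOuterB query r q (q.length : Int) (r.length : Int) (g, s) (t : Int)
      = (List.range r.length).foldl (fun gs j => pvEvN query r q t gs (0 + 1 + j)) (g, s) := by
  have hm : 1 ≤ q.length := List.length_pos_iff.mpr hq
  unfold pvOuterB
  rcases Nat.lt_or_ge r.length q.length with hmn | hmn
  · rw [PySem.List.pyRange_one_eq_nil (by exact_mod_cast (by omega : (r.length : Int) + 1 ≤ (q.length : Int)))]
    simp only [List.foldl_nil]
    exact (pvEvN_low query r q t r.length 0 (by omega) (g, s)).symm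
  · rw [PySem.List.pyRange_one,
        show ((r.length : Int) + 1 - (q.length : Int)).toNat = r.length + 1 - q.length from by omega,
        List.foldl_map]
    conv_rhs => rw [show r.length = (q.length - 1) + (r.length + 1 - q.length) from by omega]
    rw [List.range_add, List.foldl_append,
        pvEvN_low query r q t (q.length - 1) 0 (by omega) (g, s), List.foldl_map]
    have hfun : (fun (gs : List pvOut × List Int) (j : Nat) =>
          pvColB query r q (q.length : Int) (t : Int) gs ((q.length : Int) + (j : Int)))
        = (fun gs j => pvEvN query r q t gs (0 + 1 + (q.length - 1 + j))) := by
      funext gs j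
      rw [pvColB_eq_evN query r q t j gs, show 0 + 1 + (q.length - 1 + j) = q.length + j from by omega]
    rw [hfun]

-- ---- one outer iteration ----

lemma pvOuter_step (query : String) (r q : List Char) (u : List Int) (ec : Int)
    (hec : ec = ((2 ^ q.length - 1 : Nat) : Int)) (t : Nat) (hq : q ≠ [])
    (g : List pvOut) (s : List Int) :
    pvOuterA query r (r.length : Int) (q.length : Int) ec (pvGenerateAlphabet r q)
        (pvMatAfter q r u t, g, s) ((1 + t : Nat) : Int)
      = (pvMatAfter q r u (t + 1), pvOuterB query r q (q.length : Int) (r.length : Int) (g, s) (t : Int)) := by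
  have hM0 : (pvMatAfter q r u t).length = t + 1 := by simp [pvMatAfter]
  have hMprev : 1 ≤ t → (pvMatAfter q r u t).getD t [] = pvRowI q r (t - 1) r.length := by
    intro ht
    unfold pvMatAfter
    cases t with
    | zero => omega
    | succ t' =>
      rw [List.getD_cons_succ, List.getD_eq_getElem?_getD, List.getElem?_map,
          List.getElem?_range (by omega)]
      rfl
  have hecrow : [ec] = pvRowI q r t 0 := by
    rw [hec]
    have h0 : pvR q r t 0 = 2 ^ q.length - 1 := by cases t <;> rfl
    simp [pvRowI, List.range_one, h0]
  simp only [pvOuterA]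
  rw [hecrow]
  rw [PySem.List.pyRange_one,
      show ((r.length : Int) + 1 - 1).toNat = r.length from by omega,
      List.foldl_map]
  have hfun : (fun (st : List (List Int) × List pvOut × List Int) (j : Nat) =>
        pvInnerA query r (r.length : Int) (q.length : Int) (pvGenerateAlphabet r q) ((1 + t : Nat) : Int) st ((1 : Int) + (j : Int)))
      = (fun st j => pvInnerA query r (r.length : Int) (q.length : Int) (pvGenerateAlphabet r q) ((1 + t : Nat) : Int) st ((0 + 1 + j : Nat) : Int)) := by
    funext st j
    rw [show ((1 : Int) + (j : Int)) = ((0 + 1 + j : Nat) : Int) from by push_cast; ring]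
  rw [hfun]
  rw [pvInnerA_fold query r q t (pvMatAfter q r u t) hq hM0 hMprev r.length 0 g s (by omega)]
  rw [pvLevelB query r q t hq g s]
  rw [show pvMatAfter q r u t ++ [pvRowI q r t (0 + r.length)] = pvMatAfter q r u (t + 1) from by
    simp [pvMatAfter, List.range_succ]]

-- ---- the outer fold ----

lemma pvTop (query : String) (r q : List Char) (u : List Int) (ec : Int)
    (hec : ec = ((2 ^ q.length - 1 : Nat) : Int)) (hq : q ≠ []) :
    ∀ (T : Nat),
    (List.range T).foldl
        (fun st j => pvOuterA query r (r.length : Int) (q.length : Int) ec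
          (pvGenerateAlphabet r q) st ((1 + j : Nat) : Int))
        (pvMatAfter q r u 0, [], [])
      = (pvMatAfter q r u T,
         (List.range T).foldl
           (fun gs j => pvOuterB query r q (q.length : Int) (r.length : Int) gs ((j : Nat) : Int))
           ([], [])) := by
  intro T
  induction T with
  | zero => rfl
  | succ T ih =>
    rw [List.range_succ, List.foldl_append, List.foldl_append, ih]
    simp only [List.foldl_cons, List.foldl_nil]
    set gs := (List.range T).foldl
      (fun gs j => pvOuterB query r q (q.length : Int) (r.length : Int) gs ((j : Nat) : Int)) ([], []) with hgs
    have hstep := pvOuter_step query r q u ec hec T hq gs.1 gs.2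
    rw [show ((gs.1, gs.2) : List pvOut × List Int) = gs from rfl] at hstep
    exact hstep

-- ===== VERDICT (by name: the statement is the Claim_ definition above) =====
theorem bitapSearch_spec : Claim_equal_bitapSearch := by
  intro reference query mismatch _ hpre
  unfold Spec_bitapSearch
  have hq : query.toList ≠ [] := fun hh => hpre (String.toList_inj.mp (by rw [hh]; rfl))
  have hm : 1 ≤ query.toList.length := List.length_pos_iff.mpr hq
  simp only [bitapSearch, bitapSearch_alt, PySem.Str.len_eq]
  have hec : ((2 : Int) <<< (((query.toList.length : Int) - 1).toNat)) - 1
      = ((2 ^ query.toList.length - 1 : Nat) : Int) := by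
    rw [show ((query.toList.length : Int) - 1).toNat = query.toList.length - 1 from by omega,
        show (2 : Int) = ((2 : Nat) : Int) from rfl, pvShlCast,
        show (2 : Nat) <<< (query.toList.length - 1) = 2 ^ query.toList.length from by
          rw [Nat.shiftLeft_eq, ← pow_succ']
          congr 1
          omega]
    have h1 : 1 ≤ 2 ^ query.toList.length := Nat.one_le_two_pow
    omega
  rw [hec]
  rw [PySem.List.pyRange_one 1 (mismatch + 2), PySem.List.pyRange_zero (mismatch + 1),
      show mismatch + 2 - 1 = mismatch + 1 from by ring,
      List.foldl_map, List.foldl_map]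
  have hfunA : (fun (st : List (List Int) × List pvOut × List Int) (k : Nat) =>
        pvOuterA query reference.toList (reference.toList.length : Int) (query.toList.length : Int)
          ((2 ^ query.toList.length - 1 : Nat) : Int) (pvGenerateAlphabet reference.toList query.toList) st ((1 : Int) + (k : Int)))
      = (fun st j => pvOuterA query reference.toList (reference.toList.length : Int) (query.toList.length : Int)
          ((2 ^ query.toList.length - 1 : Nat) : Int) (pvGenerateAlphabet reference.toList query.toList) st ((1 + j : Nat) : Int)) := by
    funext st j
    rw [show ((1 : Int) + (j : Int)) = ((1 + j : Nat) : Int) from by push_cast; ring]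
  rw [hfunA]
  rw [show ([(PySem.List.pyRange 0 ((reference.toList.length : Int) + 1) 1).map
        (fun _ => ((2 ^ query.toList.length - 1 : Nat) : Int))] : List (List Int))
      = pvMatAfter query.toList reference.toList
          ((PySem.List.pyRange 0 ((reference.toList.length : Int) + 1) 1).map
            (fun _ => ((2 ^ query.toList.length - 1 : Nat) : Int))) 0 from rfl]
  rw [pvTop query reference.toList query.toList _ _ rfl hq ((mismatch + 1).toNat)]
  rw [show PySem.Set.ofList ([] : List Int) = ([] : List Int) from rfl]
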